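-- pv_equiv track=rewrite | github.com/yeopee/Showmethemoney | lotto/parse_lotto.py | get_lotto_number_win_count
-- ===== SOURCE A (Python) =====
-- import collections
--
-- def get_lotto_number_win_count(total_numbers):
--     lotto_number_win = {}
--
--     for count, numbers in total_numbers.items():
--         for number in numbers:
--             if lotto_number_win.get(number) == None:
--                 lotto_number_win[number] = []
--                 lotto_number_win[number].append(count)
--             else:
--                 lotto_number_win[number].append(count)
--
--     return collections.OrderedDict(sorted(lotto_number_win.items()))
-- ===== SOURCE B (Python) =====
-- import collections
-- import itertools
--
-- def get_lotto_number_win_count(total_numbers):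
--     # flatten to (number, count) pairs, stable-sort by number, then group one run at a time
--     pairs = [(number, count) for count, numbers in total_numbers.items() for number in numbers]
--     pairs.sort(key=lambda p: p[0])  # stable: counts keep their original iteration order per number
--     return collections.OrderedDict(
--         (number, [count for _, count in group])
--         for number, group in itertools.groupby(pairs, key=lambda p: p[0]))
-- ===== Notes on version B (the rewrite author's own statement) =====
-- stated objective: alternative
-- what changed: Replaces A's hash-map accumulation (dict of number->counts built by nested loops, then sorted by key) with a flatten/stable-sort/groupby pipeline: flatten to (number,count) pairs, stable-sort by number, and group consecutive runs in one linear pass.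
import Mathlib
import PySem

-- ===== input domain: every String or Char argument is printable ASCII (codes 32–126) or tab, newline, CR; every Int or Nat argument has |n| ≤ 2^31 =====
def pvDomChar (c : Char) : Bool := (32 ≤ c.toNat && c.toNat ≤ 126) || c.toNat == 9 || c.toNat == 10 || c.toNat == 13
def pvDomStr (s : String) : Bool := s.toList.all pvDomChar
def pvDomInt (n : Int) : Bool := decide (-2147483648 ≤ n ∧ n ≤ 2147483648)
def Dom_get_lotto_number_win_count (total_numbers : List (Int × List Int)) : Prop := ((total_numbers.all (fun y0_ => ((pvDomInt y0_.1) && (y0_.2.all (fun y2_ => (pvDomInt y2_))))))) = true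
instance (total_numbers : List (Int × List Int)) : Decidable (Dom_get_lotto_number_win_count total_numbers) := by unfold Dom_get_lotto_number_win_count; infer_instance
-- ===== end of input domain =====

-- B replaces A's dict-accumulate-then-sort-keys with flatten -> stable sort by number -> group consecutive runs (alternative decomposition, same cost).


-- ===== PORT A =====
def get_lotto_number_win_count (total_numbers : List (Int × List Int)) : List (Int × List Int) :=
  let lotto_number_win : PySem.Dict Int (List Int) :=
    total_numbers.foldl (fun d cn =>
      cn.2.foldl (fun d number =>
        if d.get? number = none then
          -- lotto_number_win[number] = []; lotto_number_win[number].append(count)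
          (d.insert number []).modify number [] (fun l => l ++ [cn.1])
        else
          -- lotto_number_win[number].append(count)
          d.modify number [] (fun l => l ++ [cn.1])) d)
      PySem.Dict.empty
  -- sorted(lotto_number_win.items()): the dict's keys are pairwise distinct, so Python's
  -- tuple comparison never reaches the second component — ordering by the key is exact here.
  PySem.List.sorted lotto_number_win.items (fun p => p.1)

-- ===== PORT B =====
-- itertools.groupby over the sorted (number, count) pairs: merge each run of adjacent equal
-- numbers into one (number, counts) entry (recursion on the pair list)
def pvGroupBy : List (Int × Int) → List (Int × List Int)
  | [] => []
  | (k, c) :: rest =>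
    match pvGroupBy rest with
    | (k', cs) :: gs => if k' = k then (k, c :: cs) :: gs else (k, [c]) :: (k', cs) :: gs
    | [] => [(k, [c])]

def get_lotto_number_win_count_alt (total_numbers : List (Int × List Int)) : List (Int × List Int) :=
  let pairs := total_numbers.flatMap (fun cn => cn.2.map (fun number => (number, cn.1)))
  pvGroupBy (PySem.List.sorted pairs (fun p => p.1))

-- ===== PRECONDITION & SPEC =====
def Spec_get_lotto_number_win_count (total_numbers : List (Int × List Int)) (out : List (Int × List Int)) : Prop := out = get_lotto_number_win_count_alt total_numbers
instance (total_numbers : List (Int × List Int)) (out : List (Int × List Int)) : Decidable (Spec_get_lotto_number_win_count total_numbers out) := by unfold Spec_get_lotto_number_win_count; infer_instance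

-- ===== CLAIM (what is proved, stated in full; the proofs are below) =====
def Claim_equal_get_lotto_number_win_count : Prop := ∀ (total_numbers : List (Int × List Int)), Dom_get_lotto_number_win_count total_numbers → Spec_get_lotto_number_win_count total_numbers (get_lotto_number_win_count total_numbers)

-- ===== LEMMAS AND PROOFS =====

theorem pvInsertBy_append_left {α : Type} (before : α → α → Bool) (x : α) (l₁ l₂ : List α)
    (h : ∀ y ∈ l₁, before x y = false) :
    PySem.List.insertBy before x (l₁ ++ l₂) = l₁ ++ PySem.List.insertBy before x l₂ := by
  induction l₁ with
  | nil => simp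
  | cons a t ih =>
    have ha : before x a = false := h a (by simp)
    have ht : ∀ y ∈ t, before x y = false := fun y hy => h y (by simp [hy])
    cases t <;> cases l₂ <;> simp [PySem.List.insertBy, ha] <;>
      simpa [PySem.List.insertBy, ha] using ih ht
theorem pvInsertBy_front {α : Type} (before : α → α → Bool) (x : α) (l : List α)
    (h : ∀ y ∈ l, before x y = true) :
    PySem.List.insertBy before x l = x :: l := by
  cases l with
  | nil => rfl
  | cons a t => simp [PySem.List.insertBy, h a (by simp)]

theorem pvA1 (K : List Int) (f : Int → List (Int × Int)) (p : Int × Int)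
    (hK : K.Pairwise (· < ·)) (hmem : p.1 ∈ K)
    (hf : ∀ k ∈ K, ∀ y ∈ f k, y.1 = k) :
    PySem.List.insertBy (fun a c => decide (a.1 < c.1)) p (K.flatMap f)
      = K.flatMap (fun k => f k ++ if p.1 == k then [p] else []) := by
  induction K with
  | nil => simp at hmem
  | cons k K' ih =>
    rw [List.pairwise_cons] at hK
    by_cases hk : p.1 = k
    · -- block found: skip f k, insert at its end
      have h1 : ∀ y ∈ f k, (fun a c : Int × Int => decide (a.1 < c.1)) p y = false := by
        intro y hy
        have := hf k (by simp) y hy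
        simp [this, hk]
      have h2 : ∀ y ∈ K'.flatMap f, (fun a c : Int × Int => decide (a.1 < c.1)) p y = true := by
        intro y hy
        rcases List.mem_flatMap.1 hy with ⟨k', hk', hy'⟩
        have := hf k' (by simp [hk']) y hy'
        simp [this, hk]
        exact hK.1 k' hk'
      have hnot : ∀ k' ∈ K', ¬ (p.1 == k') = true := by
        intro k' hk'
        have := hK.1 k' hk'
        simp [hk]; omega
      simp only [List.flatMap_cons]
      rw [pvInsertBy_append_left _ _ _ _ h1, pvInsertBy_front _ _ _ h2]
      have : K'.flatMap (fun k => f k ++ if p.1 == k then [p] else []) = K'.flatMap f := by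
        apply List.flatMap_congr
        intro k' hk'
        simp [hnot k' hk']
      rw [this]
      simp [hk]
    · -- descend
      have hmem' : p.1 ∈ K' := by rcases List.mem_cons.1 hmem with h | h; exact absurd h hk; exact h
      have hlt : k < p.1 := hK.1 p.1 hmem'
      have h1 : ∀ y ∈ f k, (fun a c : Int × Int => decide (a.1 < c.1)) p y = false := by
        intro y hy; have := hf k (by simp) y hy; simp [this]; omega
      simp only [List.flatMap_cons]
      rw [pvInsertBy_append_left _ _ _ _ h1, ih hK.2 hmem' (fun k hk => hf k (by simp [hk]))]
      have : (p.1 == k) = false := by simp [hk]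
      simp [this]

theorem pvA2 (K : List Int) (f : Int → List (Int × Int)) (p : Int × Int)
    (hK : K.Pairwise (· < ·)) (hmem : p.1 ∉ K)
    (hf : ∀ k ∈ K, ∀ y ∈ f k, y.1 = k) (hne : ∀ k ∈ K, f k ≠ [])
    (h0 : f p.1 = []) :
    PySem.List.insertBy (fun a c => decide (a.1 < c.1)) p (K.flatMap f)
      = (PySem.List.insertBy (fun a c => decide (a < c)) p.1 K).flatMap
          (fun k => f k ++ if p.1 == k then [p] else []) := by
  induction K with
  | nil => simp [PySem.List.insertBy, h0]
  | cons k K' ih =>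
    rw [List.pairwise_cons] at hK
    have hkne : p.1 ≠ k := by intro h; exact hmem (by simp [h])
    by_cases hlt : p.1 < k
    · -- insert in front of everything
      have h2 : ∀ y ∈ (k :: K').flatMap f, (fun a c : Int × Int => decide (a.1 < c.1)) p y = true := by
        intro y hy
        rcases List.mem_flatMap.1 hy with ⟨k', hk', hy'⟩
        have := hf k' hk' y hy'
        simp [this]
        rcases List.mem_cons.1 hk' with h | h
        · omega
        · have := hK.1 k' h; omega
      rw [pvInsertBy_front _ _ _ h2]
      have hstep : PySem.List.insertBy (fun a c : Int => decide (a < c)) p.1 (k :: K') = p.1 :: k :: K' := by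
        simp [PySem.List.insertBy, hlt]
      rw [hstep]
      simp only [List.flatMap_cons, h0]
      simp [show (p.1 == k) = false by simp [hkne]]
      symm
      apply List.flatMap_congr
      intro k' hk'
      have h1 := hK.1 k' hk'
      have h2 : p.1 ≠ k' := by omega
      simp [h2]
    · have hgt : k < p.1 := by omega
      have h1 : ∀ y ∈ f k, (fun a c : Int × Int => decide (a.1 < c.1)) p y = false := by
        intro y hy; have := hf k (by simp) y hy; simp [this]; omega
      have hmem' : p.1 ∉ K' := fun h => hmem (by simp [h])
      simp only [List.flatMap_cons]
      rw [pvInsertBy_append_left _ _ _ _ h1,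
          ih hK.2 hmem' (fun k hk => hf k (by simp [hk])) (fun k hk => hne k (by simp [hk]))]
      have hstep : PySem.List.insertBy (fun a c : Int => decide (a < c)) p.1 (k :: K') = k :: PySem.List.insertBy (fun a c : Int => decide (a < c)) p.1 K' := by
        cases K' <;> simp [PySem.List.insertBy, show ¬ (p.1 < k) by omega]
      rw [hstep]
      simp [hkne]

theorem pvSorted_eq_flatMap (ps : List (Int × Int)) :
    PySem.List.sorted ps (fun p => p.1)
      = (PySem.List.sorted (PySem.Set.ofList (ps.map (fun p => p.1))) (fun x => x)).flatMap
          (fun k => ps.filter (fun p => p.1 == k)) := by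
  induction ps using List.reverseRecOn with
  | nil => rfl
  | append_singleton ps p ih =>
    have hKS := PySem.List.sorted_ofList_pairwise_lt (κ := Int) (ps.map (fun p => p.1))
    have hf : ∀ k ∈ PySem.List.sorted (PySem.Set.ofList (ps.map (fun p => p.1))) (fun x => x),
        ∀ y ∈ ps.filter (fun p => p.1 == k), y.1 = k := by
      intro k _ y hy
      have := List.of_mem_filter hy
      simpa using this
    have hL : PySem.List.sorted (ps ++ [p]) (fun p => p.1)
        = PySem.List.insertBy (fun a c => decide (a.1 < c.1)) p (PySem.List.sorted ps (fun p => p.1)) := by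
      rw [PySem.List.sorted_eq_foldl_insertBy, List.foldl_append,
          ← PySem.List.sorted_eq_foldl_insertBy]
      rfl
    have hmap : (ps ++ [p]).map (fun q => q.1) = ps.map (fun q => q.1) ++ [p.1] := by simp
    have hofl : PySem.Set.ofList (ps.map (fun q => q.1) ++ [p.1])
        = PySem.Set.add (PySem.Set.ofList (ps.map (fun q => q.1))) p.1 := by
      rw [PySem.Set.ofList_eq_foldl, List.foldl_append, ← PySem.Set.ofList_eq_foldl]
      rfl
    have hfilt : ∀ k, (ps ++ [p]).filter (fun q => q.1 == k)
        = ps.filter (fun q => q.1 == k) ++ if p.1 == k then [p] else [] := by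
      intro k
      rw [List.filter_append]
      congr 1
      by_cases h : p.1 = k <;> simp [h]
    by_cases hmem : p.1 ∈ ps.map (fun q => q.1)
    · have hadd : PySem.Set.add (PySem.Set.ofList (ps.map (fun q => q.1))) p.1
          = PySem.Set.ofList (ps.map (fun q => q.1)) := by
        have : p.1 ∈ PySem.Set.ofList (ps.map (fun q => q.1)) := (PySem.Set.mem_ofList _ _).2 hmem
        simp [PySem.Set.add, this]
      rw [hL, ih, hmap, hofl, hadd]
      rw [pvA1 _ _ _ hKS (by rw [PySem.List.mem_sorted]; exact (PySem.Set.mem_ofList _ _).2 hmem) hf]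
      apply List.flatMap_congr
      intro k _
      exact (hfilt k).symm
    · have hadd : PySem.Set.add (PySem.Set.ofList (ps.map (fun q => q.1))) p.1
          = PySem.Set.ofList (ps.map (fun q => q.1)) ++ [p.1] := by
        have : p.1 ∉ PySem.Set.ofList (ps.map (fun q => q.1)) := fun h => hmem ((PySem.Set.mem_ofList _ _).1 h)
        simp [PySem.Set.add, this]
      have hsortadd : PySem.List.sorted (PySem.Set.ofList (ps.map (fun q => q.1)) ++ [p.1]) (fun x => x)
          = PySem.List.insertBy (fun a c : Int => decide (a < c)) p.1
              (PySem.List.sorted (PySem.Set.ofList (ps.map (fun q => q.1))) (fun x => x)) := by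
        rw [PySem.List.sorted_eq_foldl_insertBy, List.foldl_append,
            ← PySem.List.sorted_eq_foldl_insertBy]
        rfl
      have hne : ∀ k ∈ PySem.List.sorted (PySem.Set.ofList (ps.map (fun p => p.1))) (fun x => x),
          ps.filter (fun q => q.1 == k) ≠ [] := by
        intro k hk
        rw [PySem.List.mem_sorted] at hk
        have hk' : k ∈ ps.map (fun q => q.1) := (PySem.Set.mem_ofList _ _).1 hk
        rcases List.mem_map.1 hk' with ⟨q, hq, rfl⟩
        intro hnil
        have : q ∈ ps.filter (fun r => r.1 == q.1) := List.mem_filter.2 ⟨hq, by simp⟩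
        rw [hnil] at this
        simp at this
      have h0 : ps.filter (fun q => q.1 == p.1) = [] := by
        rw [List.filter_eq_nil_iff]
        intro q hq hbeq
        exact hmem (List.mem_map.2 ⟨q, hq, by simpa using hbeq⟩)
      rw [hL, ih, hmap, hofl, hadd, hsortadd]
      rw [pvA2 _ _ _ hKS (by rw [PySem.List.mem_sorted]; intro h; exact hmem ((PySem.Set.mem_ofList _ _).1 h)) hf hne h0]
      apply List.flatMap_congr
      intro k _
      exact (hfilt k).symm

theorem pvGroupBy_block (blk rest : List (Int × Int)) (k : Int)
    (hne : blk ≠ []) (hk : ∀ y ∈ blk, y.1 = k)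
    (hhead : ∀ k' cs gs, pvGroupBy rest = (k', cs) :: gs → k' ≠ k) :
    pvGroupBy (blk ++ rest) = (k, blk.map (fun y => y.2)) :: pvGroupBy rest := by
  induction blk with
  | nil => exact absurd rfl hne
  | cons b t ih =>
    obtain ⟨b1, b2⟩ := b
    have hb1 : b1 = k := hk (b1, b2) (by simp)
    subst hb1
    cases t with
    | nil =>
      simp only [List.cons_append, List.nil_append, pvGroupBy]
      cases hrest : pvGroupBy rest with
      | nil => simp
      | cons g gs =>
        obtain ⟨k', cs⟩ := g
        have := hhead k' cs gs hrest
        simp [this]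
    | cons t0 ts =>
      have ht := ih (by simp) (fun y hy => hk y (by simp [hy]))
      rw [List.cons_append]
      conv_lhs => rw [pvGroupBy]
      rw [ht]
      simp

theorem pvGroupBy_flatMap (K : List Int) (f : Int → List (Int × Int))
    (hK : K.Pairwise (· < ·)) (hf : ∀ k ∈ K, ∀ y ∈ f k, y.1 = k)
    (hne : ∀ k ∈ K, f k ≠ []) :
    pvGroupBy (K.flatMap f) = K.map (fun k => (k, (f k).map (fun y => y.2))) := by
  induction K with
  | nil => rfl
  | cons k K' ih =>
    rw [List.pairwise_cons] at hK
    have hrest : pvGroupBy (K'.flatMap f) = K'.map (fun k => (k, (f k).map (fun y => y.2))) :=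
      ih hK.2 (fun k hk => hf k (by simp [hk])) (fun k hk => hne k (by simp [hk]))
    simp only [List.flatMap_cons]
    rw [pvGroupBy_block _ _ k (hne k (by simp)) (fun y hy => hf k (by simp) y hy)]
    · rw [hrest]; simp
    · intro k' cs gs heq
      rw [hrest] at heq
      cases K' with
      | nil => simp at heq
      | cons k1 K'' =>
        simp at heq
        have := hK.1 k1 (by simp)
        omega

theorem pvFinal (tn : List (Int × List Int)) :
    get_lotto_number_win_count tn = get_lotto_number_win_count_alt tn := by
  unfold get_lotto_number_win_count get_lotto_number_win_count_alt
  set pairs := tn.flatMap (fun cn => cn.2.map (fun number => (number, cn.1))) with hpairs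
  set K := PySem.Set.ofList (pairs.map (fun p => p.1)) with hK
  set KS := PySem.List.sorted K (fun x => x) with hKS
  set G := pairs.foldl (fun d p => d.modify p.1 [] (fun l => l ++ [p.2])) PySem.Dict.empty with hG
  -- collapse A's branch: both arms are d.modify number [] (· ++ [count])
  have hbranch : ∀ (cn : Int × List Int),
      (fun (d : PySem.Dict Int (List Int)) (number : Int) =>
        if d.get? number = none then
          (d.insert number []).modify number [] (fun l => l ++ [cn.1])
        else d.modify number [] (fun l => l ++ [cn.1]))
      = (fun d number => d.modify number [] (fun l => l ++ [cn.1])) := by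
    intro cn; funext d n
    by_cases h : d.get? n = none
    · simp [h, PySem.Dict.modify, PySem.Dict.getD_insert_self, PySem.Dict.insert_insert_self,
        PySem.Dict.getD_of_get?_eq_none _ _ h]
    · simp [h]
  have h1 : tn.foldl (fun d cn =>
      cn.2.foldl (fun d number =>
        if d.get? number = none then
          (d.insert number []).modify number [] (fun l => l ++ [cn.1])
        else d.modify number [] (fun l => l ++ [cn.1])) d) PySem.Dict.empty = G := by
    rw [hG, hpairs, List.foldl_flatMap]
    simp only [List.foldl_map]
    congr 1
    funext d cn
    rw [hbranch]
  rw [h1]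
  have hnodup : G.keys.Nodup := by
    rw [hG]
    exact PySem.Dict.nodup_keys_foldl_modify_key pairs (fun p => p.1) [] (fun d p => fun l => l ++ [p.2])
      PySem.Dict.empty (by rw [PySem.Dict.keys_empty]; exact List.nodup_nil)
  have hkeys : G.keys = K := by
    rw [hG, PySem.Dict.keys_foldl_modify_key, PySem.Dict.keys_empty, hK, PySem.Set.ofList_eq_foldl]
    rfl
  have hitems : G.items = K.map (fun k => (k, (pairs.filter (fun p => p.1 == k)).map (fun p => p.2))) := by
    rw [PySem.Dict.items_eq_map_keys G hnodup [], hkeys]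
    apply List.map_congr_left
    intro k _
    have h := PySem.Dict.getD_foldl_modify_append pairs PySem.Dict.empty k
    rw [PySem.Dict.getD_empty] at h
    rw [hG, h]
    rfl
  have hpair : KS.Pairwise (· < ·) := by
    rw [hKS, hK]; exact PySem.List.sorted_ofList_pairwise_lt _
  -- LHS: sorting the dict's items by key
  have hlhs : PySem.List.sorted G.items (fun p => p.1)
      = KS.map (fun k => (k, (pairs.filter (fun p => p.1 == k)).map (fun p => p.2))) := by
    apply PySem.List.sorted_eq_of_perm_of_pairwise_lt
    · rw [hitems]
      exact (PySem.List.sorted_perm K (fun x => x) false).map _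
    · rw [List.pairwise_map]
      exact hpair
  -- RHS: grouping the stable sort of the flattened pairs
  have hne : ∀ k ∈ KS, pairs.filter (fun p => p.1 == k) ≠ [] := by
    intro k hk
    rw [hKS, PySem.List.mem_sorted] at hk
    rw [hK] at hk
    have hk' : k ∈ pairs.map (fun p => p.1) := (PySem.Set.mem_ofList _ _).1 hk
    rcases List.mem_map.1 hk' with ⟨q, hq, rfl⟩
    intro hnil
    have : q ∈ pairs.filter (fun r => r.1 == q.1) := List.mem_filter.2 ⟨hq, by simp⟩
    rw [hnil] at this
    simp at this
  have hrhs : pvGroupBy (PySem.List.sorted pairs (fun p => p.1))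
      = KS.map (fun k => (k, (pairs.filter (fun p => p.1 == k)).map (fun p => p.2))) := by
    rw [pvSorted_eq_flatMap pairs, ← hK, ← hKS]
    exact pvGroupBy_flatMap KS _ hpair
      (fun k _ y hy => by simpa using List.of_mem_filter hy) hne
  rw [hlhs, hrhs]

-- ===== VERDICT (by name: the statement is the Claim_ definition above) =====
theorem get_lotto_number_win_count_spec : Claim_equal_get_lotto_number_win_count := by
  intro total_numbers _
  unfold Spec_get_lotto_number_win_count
  exact pvFinal total_numbers
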